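-- pv_equiv track=rewrite | github.com/Tammon23/CSSAdventOfCode | 2015/Day 25/Dec25_P2.py | solve
-- ===== SOURCE A (Python) =====
-- def solve(row: int, col: int) -> int:
--     fill_order = col
--
--     cur = 1
--     for _ in range(row - 1 + col - 1):
--         fill_order += cur
--         cur += 1
--
--     prev = 20151125
--     for _ in range(fill_order - 1):
--         prev *= 252533
--         prev %= 33554393
--
--     return prev
-- ===== SOURCE B (Python) =====
-- def solve(row: int, col: int) -> int:
--     m = max(row + col - 2, 0)
--     e = max(col + m * (m + 1) // 2 - 1, 0)
--     return 20151125 * pow(252533, e, 33554393) % 33554393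
-- ===== Notes on version B (the rewrite author's own statement) =====
-- stated objective: faster
-- what changed: Replaced both loops by a closed-form triangular-number formula for the grid index and three-argument pow for the modular exponentiation.
import Mathlib
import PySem

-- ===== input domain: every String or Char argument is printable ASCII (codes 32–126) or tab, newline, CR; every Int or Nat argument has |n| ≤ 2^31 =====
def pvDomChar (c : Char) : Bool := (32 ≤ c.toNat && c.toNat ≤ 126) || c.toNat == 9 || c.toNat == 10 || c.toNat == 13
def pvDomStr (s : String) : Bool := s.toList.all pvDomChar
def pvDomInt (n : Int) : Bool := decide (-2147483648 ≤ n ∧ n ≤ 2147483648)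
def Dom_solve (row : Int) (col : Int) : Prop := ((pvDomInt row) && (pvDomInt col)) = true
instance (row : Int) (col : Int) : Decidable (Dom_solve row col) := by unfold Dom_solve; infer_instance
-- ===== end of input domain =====

-- B computes the diagonal fill order in closed form and uses modular exponentiation
-- instead of A's two linear loops (faster, asymptotic).

-- ===== PORT A =====
def solve (row : Int) (col : Int) : Int :=
  let p := (PySem.List.pyRange 0 (row - 1 + col - 1) 1).foldl
    (fun (s : Int × Int) _ => (s.1 + s.2, s.2 + 1)) (col, 1)
  let fill_order := p.1
  (PySem.List.pyRange 0 (fill_order - 1) 1).foldl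
    (fun (prev : Int) _ => PySem.Int.mod (prev * 252533) 33554393) 20151125

-- ===== PORT B =====
def solve_alt (row : Int) (col : Int) : Int :=
  let m := max (row + col - 2) 0
  let e := max (col + PySem.Int.floordiv (m * (m + 1)) 2 - 1) 0
  PySem.Int.mod (20151125 * ((252533 ^ e.toNat) % 33554393)) 33554393

-- ===== PRECONDITION & SPEC =====
def Spec_solve (row : Int) (col : Int) (out : Int) : Prop := out = solve_alt row col
instance (row : Int) (col : Int) (out : Int) : Decidable (Spec_solve row col out) := by unfold Spec_solve; infer_instance

-- ===== CLAIM (what is proved, stated in full; the proofs are below) =====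
def Claim_equal_solve : Prop := ∀ (row : Int) (col : Int), Dom_solve row col → Spec_solve row col (solve row col)

-- ===== LEMMAS AND PROOFS =====

-- a foldl that ignores the list elements is function iteration on the length
theorem pv_foldl_const {α β : Type} (g : α → α) (i : α) (l : List β) :
    l.foldl (fun s _ => g s) i = g^[l.length] i := by
  induction l generalizing i with
  | nil => rfl
  | cons x xs ih => simp [List.foldl, ih, Function.iterate_succ_apply]

theorem pv_tri_succ (k : Nat) : (k + 1) * (k + 2) / 2 = k * (k + 1) / 2 + (k + 1) := by
  have h : (k + 1) * (k + 2) = k * (k + 1) + 2 * (k + 1) := by ring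
  omega

-- A's first loop after k iterations
theorem pv_iter1 (col : Int) (k : Nat) :
    (fun (s : Int × Int) => (s.1 + s.2, s.2 + 1))^[k] (col, 1)
      = (col + ((k * (k + 1) / 2 : Nat) : Int), 1 + (k : Int)) := by
  induction k with
  | zero => simp
  | succ k ih =>
    rw [Function.iterate_succ_apply', ih, pv_tri_succ]
    push_cast
    rw [Prod.mk.injEq]
    constructor <;> ring

-- A's second loop after k iterations
theorem pv_iter2 (k : Nat) :
    (fun (prev : Int) => PySem.Int.mod (prev * 252533) 33554393)^[k] 20151125
      = (20151125 * 252533 ^ k) % 33554393 := by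
  induction k with
  | zero => norm_num
  | succ k ih =>
    rw [Function.iterate_succ_apply', ih,
      PySem.Int.mod_eq_emod_of_pos (by norm_num)]
    conv_rhs => rw [pow_succ, ← mul_assoc, Int.mul_emod]
    rw [Int.mul_emod]
    norm_num [Int.emod_emod_of_dvd]

theorem pv_toNat_max (x : Int) : (max x 0).toNat = x.toNat := by
  rw [← Int.toNat_eq_max, Int.toNat_natCast]

-- ===== VERDICT (by name: the statement is the Claim_ definition above) =====
theorem solve_spec : Claim_equal_solve := by
  intro row col _
  unfold Spec_solve solve solve_alt
  rw [pv_foldl_const, pv_foldl_const]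
  simp only [PySem.List.length_pyRange_one, sub_zero, pv_iter1, pv_iter2]
  have hrc : row + col - 2 = row - 1 + col - 1 := by ring
  set k1 := (row - 1 + col - 1).toNat with hk1
  have hm : max (row + col - 2) 0 = (k1 : Int) := by
    rw [hrc]; exact (Int.toNat_eq_max _).symm
  rw [hm]
  have hfd : PySem.Int.floordiv ((k1 : Int) * ((k1 : Int) + 1)) 2
      = ((k1 * (k1 + 1) / 2 : Nat) : Int) := by
    exact_mod_cast PySem.Int.floordiv_natCast (k1 * (k1 + 1)) 2
  rw [hfd, pv_toNat_max, PySem.Int.mod_eq_emod_of_pos (by norm_num),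
    Int.mul_emod, Int.mul_emod 20151125 (252533 ^ _ % 33554393),
    Int.emod_emod_of_dvd _ dvd_rfl]
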